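-- pv_equiv track=rewrite | github.com/ALTA-DE1-ARTA-09MARET1998/Basic-Programming-Part4 | problem2/main.py | draw_xyz
-- ===== SOURCE A (Python) =====
-- def draw_xyz(N):
--     pattern = ""
--
--     for i in range(N):
--         for j in range(1, N + 1):
--             if ((N * i) + j) % 3 == 0:
--                 pattern += "X "
--             elif ((N * i) + j) % 2 == 0:
--                 pattern += "Z "
--             elif ((N * i) + j) % 2 != 0:
--                 pattern += "Y "
--         pattern += "\n"
--     return pattern
-- ===== SOURCE B (Python) =====
-- def draw_xyz(N):
--     if N <= 0:
--         return ""
--     pattern = ""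
--     for k in range(1, N * N + 1):
--         if k % 3 == 0:
--             pattern += "X "
--         elif k % 2 == 0:
--             pattern += "Z "
--         else:
--             pattern += "Y "
--         if k % N == 0:
--             pattern += "\n"
--     return pattern
-- ===== Notes on version B (the rewrite author's own statement) =====
-- stated objective: simpler
-- what changed: Replaces the nested row/column loops by one flat loop over k = 1..N*N (the cell index N*i+j already runs contiguously), appending a newline whenever k % N == 0; a guard for non-positive N matches A's empty outer range.
import Mathlib
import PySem

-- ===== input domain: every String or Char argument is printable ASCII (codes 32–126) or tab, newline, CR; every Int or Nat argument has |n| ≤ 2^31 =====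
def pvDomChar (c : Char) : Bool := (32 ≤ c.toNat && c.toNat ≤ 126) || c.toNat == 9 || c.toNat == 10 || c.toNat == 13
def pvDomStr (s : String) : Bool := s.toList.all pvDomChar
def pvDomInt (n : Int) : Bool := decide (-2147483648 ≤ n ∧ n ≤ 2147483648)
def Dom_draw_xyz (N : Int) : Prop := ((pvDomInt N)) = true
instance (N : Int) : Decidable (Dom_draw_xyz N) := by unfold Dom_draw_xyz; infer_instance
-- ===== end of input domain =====

-- B replaces A's nested row/column loops by one flat loop over k = 1..N*N (simpler decomposition; same cost).


-- ===== PORT A =====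
def draw_xyz (N : Int) : String :=
  (PySem.List.pyRange 0 N 1).foldl (fun pattern i =>
    ((PySem.List.pyRange 1 (N + 1) 1).foldl (fun p j =>
      if PySem.Int.mod (N * i + j) 3 = 0 then p ++ "X "
      else if PySem.Int.mod (N * i + j) 2 = 0 then p ++ "Z "
      else if PySem.Int.mod (N * i + j) 2 ≠ 0 then p ++ "Y "
      else p) pattern) ++ "\n") ""

-- ===== PORT B =====
def draw_xyz_alt (N : Int) : String :=
  if N ≤ 0 then ""
  else
    (PySem.List.pyRange 1 (N * N + 1) 1).foldl (fun p k =>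
      let p' :=
        if PySem.Int.mod k 3 = 0 then p ++ "X "
        else if PySem.Int.mod k 2 = 0 then p ++ "Z "
        else p ++ "Y "
      if PySem.Int.mod k N = 0 then p' ++ "\n" else p') ""

-- ===== PRECONDITION & SPEC =====
def Spec_draw_xyz (N : Int) (out : String) : Prop := out = draw_xyz_alt N
instance (N : Int) (out : String) : Decidable (Spec_draw_xyz N out) := by unfold Spec_draw_xyz; infer_instance

-- ===== CLAIM (what is proved, stated in full; the proofs are below) =====
def Claim_equal_draw_xyz : Prop := ∀ (N : Int), Dom_draw_xyz N → Spec_draw_xyz N (draw_xyz N)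

-- ===== LEMMAS AND PROOFS =====

-- A's inner-loop step for row i, and B's flat-loop step.
def pvAstep (N i : Int) (p : String) (j : Int) : String :=
  if PySem.Int.mod (N * i + j) 3 = 0 then p ++ "X "
  else if PySem.Int.mod (N * i + j) 2 = 0 then p ++ "Z "
  else if PySem.Int.mod (N * i + j) 2 ≠ 0 then p ++ "Y "
  else p

def pvBstep (N : Int) (p : String) (k : Int) : String :=
  let p' :=
    if PySem.Int.mod k 3 = 0 then p ++ "X "
    else if PySem.Int.mod k 2 = 0 then p ++ "Z "
    else p ++ "Y "
  if PySem.Int.mod k N = 0 then p' ++ "\n" else p'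

-- One chunk of B's flat loop (cells N*i+1 .. N*i+N) equals one full row of A plus its newline.
lemma pvChunk (N i : Int) (hN : 0 < N) (p : String) :
    (PySem.List.pyRange (N * i + 1) (N * i + N + 1) 1).foldl (pvBstep N) p
      = ((PySem.List.pyRange 1 (N + 1) 1).foldl (pvAstep N i) p) ++ "\n" := by
  have hsplit : PySem.List.pyRange 1 (N + 1) 1
      = PySem.List.pyRange 1 N 1 ++ [N] := by
    have := PySem.List.pyRange_one_succ_right (a := 1) (b := N) (by omega)
    simpa using this
  -- reindex B's chunk by k = N*i + j
  have hre : PySem.List.pyRange (N * i + 1) (N * i + N + 1) 1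
      = (PySem.List.pyRange 1 (N + 1) 1).map (fun j => N * i + j) := by
    rw [PySem.List.pyRange_one, PySem.List.pyRange_one]
    have h1 : (N * i + N + 1 - (N * i + 1)).toNat = (N + 1 - 1).toNat := by omega
    rw [h1, List.map_map]
    exact List.map_congr_left (fun k _ => by simp; ring)
  rw [hre, List.foldl_map, hsplit]
  rw [List.foldl_append, List.foldl_append]
  have hmid : ∀ q : String,
      (PySem.List.pyRange 1 N 1).foldl (fun p j => pvBstep N p (N * i + j)) q
        = (PySem.List.pyRange 1 N 1).foldl (pvAstep N i) q := by
    intro q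
    apply PySem.List.foldl_congr_mem
    intro p j hj
    have hj' := (PySem.List.mem_pyRange_one).1 hj
    have hmod : PySem.Int.mod (N * i + j) N = j := by
      rw [PySem.Int.mod_eq_emod_of_pos hN]
      rw [show N * i + j = j + N * i by ring, Int.add_mul_emod_self_left]
      exact Int.emod_eq_of_lt (by omega) (by omega)
    simp only [pvBstep, pvAstep, hmod]
    have : ¬ (j = 0) := by omega
    simp only [this]
    split_ifs with h1 h2 h3 <;> simp_all
  rw [hmid]
  -- last cell j = N: B appends the character and then the newline
  have hmodN : PySem.Int.mod (N * i + N) N = 0 := by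
    rw [PySem.Int.mod_eq_emod_of_pos hN]
    have : N * i + N = (i + 1) * N := by ring
    rw [this]
    simp [Int.mul_emod_left]
  simp only [List.foldl_cons, List.foldl_nil, pvBstep, pvAstep, hmodN]
  split_ifs with h1 h2 h3 <;> simp_all

-- The flat loop over the first m rows' worth of cells equals A's outer loop over m rows.
lemma pvMain (N : Int) (hN : 0 < N) (m : Nat) :
    (PySem.List.pyRange 1 (N * m + 1) 1).foldl (pvBstep N) ""
      = (PySem.List.pyRange 0 (m : Int) 1).foldl
          (fun p i => ((PySem.List.pyRange 1 (N + 1) 1).foldl (pvAstep N i) p) ++ "\n") "" := by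
  induction m with
  | zero => simp [PySem.List.pyRange_one_eq_nil]
  | succ m ih =>
    have hsplitB : PySem.List.pyRange 1 (N * (m + 1 : Nat) + 1) 1
        = PySem.List.pyRange 1 (N * m + 1) 1
          ++ PySem.List.pyRange (N * m + 1) (N * m + N + 1) 1 := by
      have h1 : (1 : Int) ≤ N * m + 1 := by
        have := mul_nonneg hN.le (Int.natCast_nonneg m); omega
      have h2 : N * m + 1 ≤ N * (m + 1 : Nat) + 1 := by push_cast; nlinarith
      have := PySem.List.pyRange_one_append (a := 1) (m := N * m + 1)
        (b := N * (m + 1 : Nat) + 1) h1 h2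
      rw [this]
      congr 1
      congr 1
      push_cast; ring
    have hsplitA : PySem.List.pyRange 0 ((m + 1 : Nat) : Int) 1
        = PySem.List.pyRange 0 (m : Int) 1 ++ [(m : Int)] := by
      have := PySem.List.pyRange_one_succ_right (a := 0) (b := (m : Int)) (Int.natCast_nonneg m)
      push_cast
      simpa using this
    rw [hsplitB, hsplitA, List.foldl_append, List.foldl_append, ih,
      pvChunk N (m : Int) hN]
    simp

-- ===== VERDICT (by name: the statement is the Claim_ definition above) =====
theorem draw_xyz_spec : Claim_equal_draw_xyz := by
  intro N _
  unfold Spec_draw_xyz draw_xyz draw_xyz_alt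
  by_cases hN : N ≤ 0
  · rw [if_pos hN, PySem.List.pyRange_one_eq_nil hN]
    rfl
  · rw [if_neg hN]
    have hN' : 0 < N := by omega
    obtain ⟨n, rfl⟩ : ∃ n : Nat, N = (n : Int) := ⟨N.toNat, by omega⟩
    exact (pvMain (n : Int) hN' n).symm
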